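-- pv_equiv track=rewrite | github.com/vikkastiwari/competitive-coding-questions | company/InfyTQ/Fundamentals/07SET/anagram.py | check_anagram
-- ===== SOURCE A (Python) =====
-- from collections import Counter
--
-- def check_anagram(data1, data2):
--     # start writing your code here
--     d1 = Counter(data1.lower())
--     d2 = Counter(data2.lower())
--     if d1 == d2:
--         # The zip() function returns a zip object, which is an iterator of tuples where the first item in each passed iterator is paired together
--         for i, j in zip(data1, data2):
--             if i == j:
--                 return False
--         return True
--     else:
--         return False
-- ===== SOURCE B (Python) =====
-- def check_anagram(data1, data2):
--     if sorted(data1.lower()) != sorted(data2.lower()):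
--         return False
--     return all(i != j for i, j in zip(data1, data2))
-- ===== Notes on version B (the rewrite author's own statement) =====
-- stated objective: simpler
-- what changed: Replaces the two Counter hash tables and their dict-equality test by a sort-then-compare anagram check, and the explicit early-return zip loop by a single all() over the zipped pairs.
import Mathlib
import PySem

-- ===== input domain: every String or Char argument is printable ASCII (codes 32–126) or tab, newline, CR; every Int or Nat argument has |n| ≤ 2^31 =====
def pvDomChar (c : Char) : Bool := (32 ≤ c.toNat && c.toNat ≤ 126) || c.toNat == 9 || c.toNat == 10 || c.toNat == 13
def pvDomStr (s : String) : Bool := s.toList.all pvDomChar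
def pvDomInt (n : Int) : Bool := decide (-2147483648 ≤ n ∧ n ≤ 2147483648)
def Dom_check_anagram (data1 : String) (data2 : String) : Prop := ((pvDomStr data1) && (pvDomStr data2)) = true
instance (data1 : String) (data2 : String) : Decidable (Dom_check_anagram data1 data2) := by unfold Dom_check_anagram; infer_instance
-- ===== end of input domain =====

-- B replaces the Counter tables and dict comparison by sorted-list comparison and the
-- early-return zip loop by all(); objective: simpler.

-- ===== PORT A =====
-- Python dict == ignores insertion order: compare key-by-key in both directions.
def pyCounterEq (d1 d2 : PySem.Dict Char Int) : Bool :=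
  d1.keys.all (fun k => d1.get? k == d2.get? k) && d2.keys.all (fun k => d1.get? k == d2.get? k)

-- the 'for i, j in zip(...)' loop with its early 'return False'
def zipLoopA : List (Char × Char) → Bool
  | [] => true
  | (i, j) :: rest => if i == j then false else zipLoopA rest

def check_anagram (data1 : String) (data2 : String) : Bool :=
  let d1 := PySem.Dict.counter (PySem.Str.lower data1).toList
  let d2 := PySem.Dict.counter (PySem.Str.lower data2).toList
  if pyCounterEq d1 d2 then
    zipLoopA (data1.toList.zip data2.toList)
  else
    false

-- ===== PORT B =====
def check_anagram_alt (data1 : String) (data2 : String) : Bool :=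
  if PySem.List.sorted (PySem.Str.lower data1).toList (fun x => x) false ≠
      PySem.List.sorted (PySem.Str.lower data2).toList (fun x => x) false then
    false
  else
    (data1.toList.zip data2.toList).all (fun p => p.1 != p.2)

-- ===== PRECONDITION & SPEC =====
def Spec_check_anagram (data1 : String) (data2 : String) (out : Bool) : Prop := out = check_anagram_alt data1 data2
instance (data1 : String) (data2 : String) (out : Bool) : Decidable (Spec_check_anagram data1 data2 out) := by unfold Spec_check_anagram; infer_instance

-- ===== CLAIM (what is proved, stated in full; the proofs are below) =====
def Claim_equal_check_anagram : Prop := ∀ (data1 : String) (data2 : String), Dom_check_anagram data1 data2 → Spec_check_anagram data1 data2 (check_anagram data1 data2)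

-- ===== LEMMAS AND PROOFS =====

theorem zipLoopA_eq_all (zs : List (Char × Char)) :
    zipLoopA zs = zs.all (fun p => p.1 != p.2) := by
  induction zs with
  | nil => rfl
  | cons z rest ih =>
    obtain ⟨i, j⟩ := z
    simp only [zipLoopA, List.all_cons, ih, bne]
    by_cases h : i == j <;> simp [h]

theorem get?_counter_char (xs : List Char) (c : Char) :
    (PySem.Dict.counter xs).get? c = if c ∈ xs then some (xs.count c : Int) else none := by
  by_cases h : c ∈ xs
  · have hne : (PySem.Dict.counter xs).get? c ≠ none := by
      intro hn
      rw [PySem.Dict.get?_eq_none_iff_not_mem_keys, PySem.Dict.keys_counter] at hn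
      exact hn (by simpa [PySem.Set.mem_ofList] using h)
    obtain ⟨v, hv⟩ := Option.ne_none_iff_exists'.mp hne
    have hgd := PySem.Dict.getD_of_get?_eq_some (PySem.Dict.counter xs) (0 : Int) hv
    rw [PySem.Dict.getD_counter] at hgd
    rw [if_pos h, hv, hgd]
  · rw [if_neg h]
    rw [PySem.Dict.get?_eq_none_iff_not_mem_keys, PySem.Dict.keys_counter]
    simp [PySem.Set.mem_ofList, h]

theorem counterEq_iff_perm (l1 l2 : List Char) :
    pyCounterEq (PySem.Dict.counter l1) (PySem.Dict.counter l2) = true ↔ l1.Perm l2 := by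
  rw [List.perm_iff_count]
  unfold pyCounterEq
  simp only [Bool.and_eq_true, List.all_eq_true, PySem.Dict.keys_counter,
    PySem.Set.mem_ofList]
  constructor
  · rintro ⟨h1, h2⟩ c
    by_cases hc1 : c ∈ l1
    · have := h1 c hc1
      rw [get?_counter_char, get?_counter_char, if_pos hc1] at this
      by_cases hc2 : c ∈ l2
      · rw [if_pos hc2] at this
        simpa using this
      · rw [if_neg hc2] at this; simp at this
    · by_cases hc2 : c ∈ l2
      · have := h2 c hc2
        rw [get?_counter_char, get?_counter_char, if_neg hc1, if_pos hc2] at this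
        simp at this
      · simp [List.count_eq_zero_of_not_mem, hc1, hc2]
  · intro h
    have key : ∀ c : Char, (PySem.Dict.counter l1).get? c = (PySem.Dict.counter l2).get? c := by
      intro c
      have hm : c ∈ l1 ↔ c ∈ l2 := by
        rw [← List.count_pos_iff, ← List.count_pos_iff, h c]
      rw [get?_counter_char, get?_counter_char, h c]
      by_cases hc2 : c ∈ l2 <;> simp [hm, hc2]
    exact ⟨fun c _ => by rw [key c]; simp, fun c _ => by rw [key c]; simp⟩

-- ===== VERDICT (by name: the statement is the Claim_ definition above) =====
theorem check_anagram_spec : Claim_equal_check_anagram := by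
  intro data1 data2 _
  unfold Spec_check_anagram
  simp only [check_anagram, check_anagram_alt]
  have hcond : pyCounterEq (PySem.Dict.counter (PySem.Str.lower data1).toList)
      (PySem.Dict.counter (PySem.Str.lower data2).toList) = true ↔
      PySem.List.sorted (PySem.Str.lower data1).toList (fun x => x) false =
        PySem.List.sorted (PySem.Str.lower data2).toList (fun x => x) false := by
    rw [counterEq_iff_perm, PySem.List.sorted_id_eq_sorted_id_iff_perm]
  by_cases h : pyCounterEq (PySem.Dict.counter (PySem.Str.lower data1).toList)
      (PySem.Dict.counter (PySem.Str.lower data2).toList) = true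
  · rw [if_pos h, if_neg (not_not_intro (hcond.mp h)), zipLoopA_eq_all]
  · rw [if_neg h, if_pos (fun heq => h (hcond.mpr heq))]
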